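-- pv_equiv track=rewrite | github.com/AhmedAi7/TravelAgent | AIProject.py | GetDaysList
-- ===== SOURCE A (Python) =====
-- DaysOfWeek = ["sat","sun", "mon", "tue", "wed", "thu", "fri"]
--
-- def GetDaysList (FDay,SDay):
--     output=[]
--     Append=False
--     for i in DaysOfWeek:
--         if (i==FDay):
--             Append=True
--         if (Append==True):
--             output.append(i)
--         if (i==SDay):
--             Append=False
--     return output
-- ===== SOURCE B (Python) =====
-- DaysOfWeek = ["sat","sun", "mon", "tue", "wed", "thu", "fri"]
--
-- def GetDaysList(FDay, SDay):
--     if FDay not in DaysOfWeek: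
--         return []
--     tail = DaysOfWeek[DaysOfWeek.index(FDay):]
--     if SDay in tail:
--         return tail[:tail.index(SDay) + 1]
--     return tail
-- ===== Notes on version B (the rewrite author's own statement) =====
-- stated objective: idiomatic
-- what changed: Replaces the single-pass boolean-flag scan with an index-lookup-then-slice strategy: guard on FDay membership, take the tail slice from FDay, and cut it after SDay only if SDay occurs in that tail.
import Mathlib
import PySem

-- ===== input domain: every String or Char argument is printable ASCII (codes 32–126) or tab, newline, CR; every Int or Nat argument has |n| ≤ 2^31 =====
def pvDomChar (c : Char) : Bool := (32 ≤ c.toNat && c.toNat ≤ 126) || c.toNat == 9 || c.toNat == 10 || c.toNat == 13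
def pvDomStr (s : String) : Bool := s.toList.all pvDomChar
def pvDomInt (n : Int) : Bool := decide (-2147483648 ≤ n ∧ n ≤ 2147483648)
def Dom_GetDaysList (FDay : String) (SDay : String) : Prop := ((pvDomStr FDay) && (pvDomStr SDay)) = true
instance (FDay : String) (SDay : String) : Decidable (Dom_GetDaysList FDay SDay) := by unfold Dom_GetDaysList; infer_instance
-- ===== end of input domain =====

-- B replaces A's boolean-flag scan by a membership guard plus index-and-slice; same result, idiomatic form.

-- ===== PORT A =====
def DaysOfWeek : List String := ["sat","sun", "mon", "tue", "wed", "thu", "fri"]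

-- one iteration of A's loop body, on state (output, Append)
def GetDaysListStep (FDay : String) (SDay : String) (st : List String × Bool) (i : String) : List String × Bool :=
  let app := if i = FDay then true else st.2
  let out := if app then st.1 ++ [i] else st.1
  let app2 := if i = SDay then false else app
  (out, app2)

def GetDaysList (FDay : String) (SDay : String) : List String :=
  (DaysOfWeek.foldl (GetDaysListStep FDay SDay) ([], false)).1

-- ===== PORT B =====
def GetDaysList_alt (FDay : String) (SDay : String) : List String :=
  if FDay ∈ DaysOfWeek then
    let tail := PySem.List.slice DaysOfWeek (some (((PySem.List.index? DaysOfWeek FDay).getD 0 : Nat) : Int)) none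
    if SDay ∈ tail then
      PySem.List.slice tail none (some ((((PySem.List.index? tail SDay).getD 0 : Nat) : Int) + 1))
    else tail
  else []

-- ===== PRECONDITION & SPEC =====
def Spec_GetDaysList (FDay : String) (SDay : String) (out : List String) : Prop := out = GetDaysList_alt FDay SDay
instance (FDay : String) (SDay : String) (out : List String) : Decidable (Spec_GetDaysList FDay SDay out) := by unfold Spec_GetDaysList; infer_instance

-- ===== CLAIM (what is proved, stated in full; the proofs are below) =====
def Claim_equal_GetDaysList : Prop := ∀ (FDay : String) (SDay : String), Dom_GetDaysList FDay SDay → Spec_GetDaysList FDay SDay (GetDaysList FDay SDay)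

-- ===== LEMMAS AND PROOFS =====

-- ===== VERDICT (by name: the statement is the Claim_ definition above) =====
theorem GetDaysList_spec : Claim_equal_GetDaysList := by
  unfold Claim_equal_GetDaysList Spec_GetDaysList
  intro F S _
  by_cases hF : F ∈ DaysOfWeek
  · simp only [DaysOfWeek, List.mem_cons, List.not_mem_nil, or_false] at hF
    rcases hF with h | h | h | h | h | h | h <;> subst h <;>
    · by_cases hS : S ∈ DaysOfWeek
      · simp only [DaysOfWeek, List.mem_cons, List.not_mem_nil, or_false] at hS
        rcases hS with h | h | h | h | h | h | h <;> subst h <;> decide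
      · simp only [DaysOfWeek, List.mem_cons, List.not_mem_nil, or_false, not_or] at hS
        obtain ⟨h1, h2, h3, h4, h5, h6, h7⟩ := hS
        simp [GetDaysList, GetDaysList_alt, GetDaysListStep, DaysOfWeek,
          List.idxOf?, List.findIdx?_cons, PySem.List.slice, PySem.List.clampIdx,
          h1, h2, h3, h4, h5, h6, h7, Ne.symm h1, Ne.symm h2, Ne.symm h3, Ne.symm h4,
          Ne.symm h5, Ne.symm h6, Ne.symm h7]
  · simp only [DaysOfWeek, List.mem_cons, List.not_mem_nil, or_false, not_or] at hF
    obtain ⟨h1, h2, h3, h4, h5, h6, h7⟩ := hF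
    simp [GetDaysList, GetDaysList_alt, GetDaysListStep, DaysOfWeek,
      h1, h2, h3, h4, h5, h6, h7, Ne.symm h1, Ne.symm h2, Ne.symm h3, Ne.symm h4,
      Ne.symm h5, Ne.symm h6, Ne.symm h7]
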